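-- pv_equiv track=rewrite | github.com/tafuji-jn/kobitokey | scripts/update_excluded_positions.py | parse_bindings
-- ===== SOURCE A (Python) =====
-- def parse_bindings(bindings_text: str) -> list[str]:
--     """bindings文字列をキーバインディングのリストに分割する。"""
--     # 全体を空白でトークン分割
--     tokens = bindings_text.split()
--     keys = []
--     current = None
--
--     for token in tokens:
--         if token.startswith("&"):
--             # 新しいバインディングの開始
--             if current is not None:
--                 keys.append(current)
--             current = token
--         else:
--             # 前のバインディングのパラメータ
--             if current is not None:
--                 current += " " + token
--     if current is not None:
--         keys.append(current)
--
--     return keys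
-- ===== SOURCE B (Python) =====
-- def parse_bindings(bindings_text: str) -> list[str]:
--     """bindings文字列をキーバインディングのリストに分割する。"""
--     toks = bindings_text.split()
--     n = len(toks)
--     # skip any tokens before the first "&"-token
--     i = 0
--     while i < n and not toks[i].startswith("&"):
--         i += 1
--     groups = []
--     while i < n:
--         # the group is toks[i] plus the span of following non-"&" tokens
--         j = i + 1
--         while j < n and not toks[j].startswith("&"):
--             j += 1
--         groups.append(" ".join(toks[i:j]))
--         i = j
--     return groups
-- ===== Notes on version B (the rewrite author's own statement) =====
-- stated objective: alternative
-- what changed: Replaces A's per-token state machine (Option 'current' accumulator with string concatenation) by a span scan: skip the pre-'&' prefix, then repeatedly locate each group's boundary span and join toks[i:j] in one go.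
import Mathlib
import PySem

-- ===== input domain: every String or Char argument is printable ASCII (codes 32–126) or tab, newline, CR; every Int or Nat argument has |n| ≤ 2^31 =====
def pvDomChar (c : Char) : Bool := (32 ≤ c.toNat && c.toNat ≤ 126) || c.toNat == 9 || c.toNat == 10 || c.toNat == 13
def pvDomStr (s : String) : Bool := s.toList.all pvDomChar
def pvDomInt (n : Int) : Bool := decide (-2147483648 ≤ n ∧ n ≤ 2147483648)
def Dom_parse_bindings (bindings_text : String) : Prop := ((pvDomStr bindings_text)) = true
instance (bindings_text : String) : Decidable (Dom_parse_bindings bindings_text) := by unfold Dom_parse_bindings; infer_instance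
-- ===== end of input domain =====

-- B replaces A's per-token state machine (Option accumulator) with a span scan over group
-- boundaries (skip the pre-'&' prefix, then repeatedly take one '&'-token plus its run of
-- non-'&' tokens and join the span); same cost, alternative structure.

-- ===== PORT A =====
-- one step of A's for-loop: state = (keys, current)
def pvStepA (st : List String × Option String) (token : String) : List String × Option String :=
  if PySem.Str.startswith token "&" then
    (match st.2 with
     | some c => st.1 ++ [c]
     | none => st.1,
     some token)
  else
    (st.1,
     match st.2 with
     | some c => some (c ++ " " ++ token)
     | none => none)

def parse_bindings (bindings_text : String) : List String :=
  let tokens := PySem.Str.split₀ bindings_text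
  let r := tokens.foldl pvStepA ([], none)
  match r.2 with
  | some c => r.1 ++ [c]
  | none => r.1

-- ===== PORT B =====
-- token does not start a new binding (the condition of Source B's inner/skip while-loops)
def pvNotAmp (s : String) : Bool := !(PySem.Str.startswith s "&")

-- Source B's outer while-loop: each pass takes one group span (head '&'-token plus the run of
-- following non-'&' tokens), joins it, and continues after the span
def pvSpans : List String → List String
  | [] => []
  | t :: rest =>
      PySem.Str.join " " (t :: rest.takeWhile pvNotAmp) :: pvSpans (rest.dropWhile pvNotAmp)
termination_by l => l.length
decreasing_by
  simpa using Nat.lt_succ_of_le (List.length_dropWhile_le pvNotAmp rest)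

def parse_bindings_alt (bindings_text : String) : List String :=
  pvSpans ((PySem.Str.split₀ bindings_text).dropWhile pvNotAmp)

-- ===== PRECONDITION & SPEC =====
def Spec_parse_bindings (bindings_text : String) (out : List String) : Prop := out = parse_bindings_alt bindings_text
instance (bindings_text : String) (out : List String) : Decidable (Spec_parse_bindings bindings_text out) := by unfold Spec_parse_bindings; infer_instance

-- ===== CLAIM (what is proved, stated in full; the proofs are below) =====
def Claim_equal_parse_bindings : Prop := ∀ (bindings_text : String), Dom_parse_bindings bindings_text → Spec_parse_bindings bindings_text (parse_bindings bindings_text)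

-- ===== LEMMAS AND PROOFS =====

-- A's final step, as a function of the loop state
def pvFinish (st : List String × Option String) : List String :=
  match st.2 with
  | some c => st.1 ++ [c]
  | none => st.1

theorem pv_join_singleton (sep x : String) : PySem.Str.join sep [x] = x := by
  apply String.toList_injective
  simp [PySem.Str.toList_join, PySem.Chars.join_singleton]

-- A's incremental 'current += " " + token' agrees with joining the whole span at the end
theorem pv_join_step (c x : String) (g : List String) :
    PySem.Str.join " " (c :: x :: g) = PySem.Str.join " " ((c ++ " " ++ x) :: g) := by
  apply String.toList_injective
  cases g with
  | nil => simp [PySem.Str.toList_join, PySem.Chars.join_singleton, PySem.Chars.join_cons_cons,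
      String.toList_append]
  | cons y g => simp [PySem.Str.toList_join, PySem.Chars.join_cons_cons, String.toList_append]

theorem pvSpans_nil : pvSpans [] = [] := by rw [pvSpans]

theorem pvSpans_cons (t : String) (rest : List String) :
    pvSpans (t :: rest) =
      PySem.Str.join " " (t :: rest.takeWhile pvNotAmp) :: pvSpans (rest.dropWhile pvNotAmp) := by
  rw [pvSpans]

-- while current is None, non-'&' tokens are dropped without changing the state
theorem pv_foldl_none (toks : List String) (keys : List String) :
    toks.foldl pvStepA (keys, none) = (toks.dropWhile pvNotAmp).foldl pvStepA (keys, none) := by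
  induction toks with
  | nil => rfl
  | cons x toks ih =>
    by_cases hx : PySem.Str.startswith x "&"
    · have hx' : PySem.Chars.startswith x.toList ['&'] = true := by simpa using hx
      simp [pvNotAmp, hx']
    · have hx' : PySem.Chars.startswith x.toList ['&'] = false := by simpa using hx
      simpa [List.dropWhile_cons, pvNotAmp, hx', pvStepA] using ih

-- the loop with an open group 'cur' produces cur's span followed by the remaining spans
theorem pv_foldl_some (toks : List String) (keys : List String) (cur : String) :
    pvFinish (toks.foldl pvStepA (keys, some cur)) =
      keys ++ (PySem.Str.join " " (cur :: toks.takeWhile pvNotAmp) ::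
        pvSpans (toks.dropWhile pvNotAmp)) := by
  induction toks generalizing keys cur with
  | nil => simp [pvFinish, pvSpans_nil, pv_join_singleton]
  | cons x toks ih =>
    by_cases hx : PySem.Str.startswith x "&"
    · have hx' : PySem.Chars.startswith x.toList ['&'] = true := by simpa using hx
      have hstep : pvStepA (keys, some cur) x = (keys ++ [cur], some x) := by
        simp [pvStepA, hx']
      rw [List.foldl_cons, hstep, ih]
      simp [pvNotAmp, hx', pvSpans_cons, pv_join_singleton, List.append_assoc]
    · have hx' : PySem.Chars.startswith x.toList ['&'] = false := by simpa using hx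
      have hstep : pvStepA (keys, some cur) x = (keys, some (cur ++ " " ++ x)) := by
        simp [pvStepA, hx']
      rw [List.foldl_cons, hstep, ih]
      simp [pvNotAmp, hx', pv_join_step]

-- ===== VERDICT (by name: the statement is the Claim_ definition above) =====
theorem parse_bindings_spec : Claim_equal_parse_bindings := by
  intro t _
  unfold Spec_parse_bindings parse_bindings parse_bindings_alt
  show pvFinish ((PySem.Str.split₀ t).foldl pvStepA ([], none)) = _
  rw [pv_foldl_none]
  cases hd : (PySem.Str.split₀ t).dropWhile pvNotAmp with
  | nil => simp [pvFinish, pvSpans_nil]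
  | cons x rest =>
    have hx : PySem.Str.startswith x "&" := by
      have hne : (PySem.Str.split₀ t).dropWhile pvNotAmp ≠ [] := by simp [hd]
      have h := List.head_dropWhile_not pvNotAmp hne
      simp [hd, pvNotAmp] at h
      simpa using h
    have hx' : PySem.Chars.startswith x.toList ['&'] = true := by simpa using hx
    have hstep : pvStepA ([], none) x = ([], some x) := by simp [pvStepA, hx']
    rw [List.foldl_cons, hstep, pv_foldl_some, pvSpans_cons]
    simp
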